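-- pv_equiv track=rewrite | github.com/mo9mo9-uwu-mo9mo9/Kumihan-Formatter | kumihan_formatter/parsers/list_parser.py | _extract_list_content
-- ===== SOURCE A (Python) =====
-- def _extract_list_content(line: str) -> str:
--     """リスト行からコンテンツ部分を抽出"""
--     stripped = line.strip()
--
--     # 順序なしリスト
--     if stripped.startswith('- '):
--         return stripped[2:].strip()
--     elif stripped.startswith('* '):
--         return stripped[2:].strip()
--     elif stripped.startswith('+ '):
--         return stripped[2:].strip()
--
--     # 順序ありリスト
--     if len(stripped) > 1 and stripped[0].isdigit():
--         for i, char in enumerate(stripped[1:], 1):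
--             if char == '.':
--                 if i < len(stripped) - 1 and stripped[i + 1] == ' ':
--                     return stripped[i + 2:].strip()
--                 break
--             elif not char.isdigit():
--                 break
--
--     return stripped
-- ===== SOURCE B (Python) =====
-- def _extract_list_content(line: str) -> str:
--     """Single-pass finite-state machine: one scan over the stripped line computes
--     the offset where the content starts (0 = no list marker)."""
--     s = line.strip()
--     state = 'start'
--     cut = 0
--     for i, ch in enumerate(s):
--         if state == 'start':
--             if ch in '-*+':
--                 state = 'bullet'
--             elif ch.isdigit():
--                 state = 'digits'
--             else:
--                 break
--         elif state == 'bullet':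
--             if ch == ' ':
--                 cut = i + 1
--             break
--         elif state == 'digits':
--             if ch.isdigit():
--                 pass
--             elif ch == '.':
--                 state = 'dot'
--             else:
--                 break
--         else:  # state == 'dot'
--             if ch == ' ':
--                 cut = i + 1
--             break
--     return s[cut:].strip() if cut else s
-- ===== Notes on version B (the rewrite author's own statement) =====
-- stated objective: alternative
-- what changed: Replaces A's staged structure (three startswith prefix checks followed by a separate digit-scanning loop with lookahead) by a single left-to-right pass: an explicit finite-state machine (start/bullet/digits/dot) over enumerate(s) that computes the offset where the content starts, with one slice-and-strip at the end.
import Mathlib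
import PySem

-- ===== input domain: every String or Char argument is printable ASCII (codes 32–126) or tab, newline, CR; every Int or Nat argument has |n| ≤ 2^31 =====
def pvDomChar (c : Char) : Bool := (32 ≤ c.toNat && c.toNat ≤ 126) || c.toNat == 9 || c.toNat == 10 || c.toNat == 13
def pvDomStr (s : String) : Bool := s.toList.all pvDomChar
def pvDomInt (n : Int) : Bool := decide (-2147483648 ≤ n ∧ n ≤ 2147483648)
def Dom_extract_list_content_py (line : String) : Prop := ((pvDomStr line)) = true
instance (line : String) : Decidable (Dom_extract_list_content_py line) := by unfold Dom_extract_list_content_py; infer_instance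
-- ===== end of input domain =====

-- B replaces A's staged prefix checks + separate digit-scan loop by one single-pass
-- finite-state machine computing the content-start offset (alternative decomposition;
-- same return value on every input).

-- ===== PORT A =====
-- the 'for i, char in enumerate(stripped[1:], 1): …' loop; 'some r' = early return, 'none' = break / loop end
def pvLoopA (stripped : String) : List (Int × Char) → Option String
  | [] => none
  | (i, c) :: rest =>
    if c = '.' then
      if i < PySem.Str.len stripped - 1 ∧ PySem.Str.pyGet? stripped (i + 1) = some ' '
      then some (PySem.Str.strip (PySem.Str.slice stripped (some (i + 2)) none))
      else none
    else if PySem.Chars.isdigit c then pvLoopA stripped rest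
    else none

def extract_list_content_py (line : String) : String :=
  let stripped := PySem.Str.strip line
  if PySem.Str.startswith stripped "- " then PySem.Str.strip (PySem.Str.slice stripped (some 2) none)
  else if PySem.Str.startswith stripped "* " then PySem.Str.strip (PySem.Str.slice stripped (some 2) none)
  else if PySem.Str.startswith stripped "+ " then PySem.Str.strip (PySem.Str.slice stripped (some 2) none)
  else if 1 < PySem.Str.len stripped ∧ (PySem.Str.pyGet? stripped 0).any PySem.Chars.isdigit = true then
    match pvLoopA stripped (PySem.List.enumerate (PySem.Str.slice stripped (some 1) none).toList 1) with
    | some r => r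
    | none => stripped
  else stripped

-- ===== PORT B =====
-- the states of Source B's machine
inductive PvSt : Type
  | start | bullet | digits | dot
  deriving DecidableEq, Repr

-- the 'for i, ch in enumerate(s): …' loop of Source B; returns the final value of 'cut'
-- (cut is only assigned immediately before a break, so the loop returns it directly)
def pvLoopB : PvSt → List (Int × Char) → Int
  | _, [] => 0
  | st, (i, c) :: rest =>
    match st with
    | .start =>
      if c = '-' ∨ c = '*' ∨ c = '+' then pvLoopB .bullet rest
      else if PySem.Chars.isdigit c then pvLoopB .digits rest
      else 0
    | .bullet => if c = ' ' then i + 1 else 0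
    | .digits =>
      if PySem.Chars.isdigit c then pvLoopB .digits rest
      else if c = '.' then pvLoopB .dot rest
      else 0
    | .dot => if c = ' ' then i + 1 else 0

def extract_list_content_py_alt (line : String) : String :=
  let s := PySem.Str.strip line
  let cut := pvLoopB PvSt.start (PySem.List.enumerate s.toList 0)
  if cut ≠ 0 then PySem.Str.strip (PySem.Str.slice s (some cut) none) else s

-- ===== PRECONDITION & SPEC =====
def Spec_extract_list_content_py (line : String) (out : String) : Prop := out = extract_list_content_py_alt line
instance (line : String) (out : String) : Decidable (Spec_extract_list_content_py line out) := by unfold Spec_extract_list_content_py; infer_instance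

-- ===== CLAIM (what is proved, stated in full; the proofs are below) =====
def Claim_equal_extract_list_content_py : Prop := ∀ (line : String), Dom_extract_list_content_py line → Spec_extract_list_content_py line (extract_list_content_py line)

-- ===== LEMMAS AND PROOFS =====

-- A's scanning loop (started at position k ≥ 1) agrees with B's machine in state 'digits'
theorem pvAB (s : String) (d : Nat) : ∀ k : Nat, s.toList.length ≤ k + d → 1 ≤ k →
    pvLoopA s (PySem.List.enumerate (s.toList.drop k) (k : Int))
      = (if pvLoopB PvSt.digits (PySem.List.enumerate (s.toList.drop k) (k : Int)) = 0 then none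
         else some (PySem.Str.strip (PySem.Str.slice s
            (some (pvLoopB PvSt.digits (PySem.List.enumerate (s.toList.drop k) (k : Int)))) none))) := by
  induction d with
  | zero =>
    intro k hlen _
    rw [List.drop_eq_nil_of_le (by omega)]
    simp [PySem.List.enumerate, pvLoopA, pvLoopB]
  | succ d ih =>
    intro k hlen hk1
    by_cases hk : s.toList.length ≤ k
    · rw [List.drop_eq_nil_of_le hk]
      simp [PySem.List.enumerate, pvLoopA, pvLoopB]
    · replace hk : k < s.toList.length := by omega
      have hdrop : s.toList.drop k = s.toList[k] :: s.toList.drop (k + 1) :=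
        List.drop_eq_getElem_cons hk
      have hcast : ((k : Int) + 1) = ((k + 1 : Nat) : Int) := by push_cast; ring
      have hlens : PySem.Str.len s = (s.toList.length : Int) := by simp
      rw [hdrop, PySem.List.enumerate_cons]
      by_cases hdot : s.toList[k] = '.'
      · have hnd : ¬ PySem.Chars.isdigit s.toList[k] = true := by
          rw [hdot]; simp [PySem.Chars.isdigit]
        simp only [pvLoopA, pvLoopB, if_pos hdot, if_neg hnd]
        by_cases hk1len : k + 1 < s.toList.length
        · have hdrop' : s.toList.drop (k + 1) = s.toList[k + 1] :: s.toList.drop (k + 2) :=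
            List.drop_eq_getElem_cons hk1len
          have hget : PySem.Str.pyGet? s (((k + 1 : Nat) : Int)) = some s.toList[k + 1] := by
            rw [PySem.Str.pyGet?_natCast, List.getElem?_eq_getElem hk1len]
          rw [hcast, hdrop', PySem.List.enumerate_cons]
          simp only [pvLoopB]
          by_cases hsp : s.toList[k + 1] = ' '
          · rw [if_pos hsp]
            have hA : (k : Int) < PySem.Str.len s - 1 ∧
                PySem.Str.pyGet? s (((k + 1 : Nat) : Int)) = some ' ' := by
              refine ⟨by rw [hlens]; omega, by rw [hget, hsp]⟩
            rw [if_pos hA, if_neg (by push_cast; omega : ¬ (((k + 1 : Nat) : Int) + 1 = 0))]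
            have h22 : ((k : Int) + 2) = (((k + 1 : Nat) : Int) + 1) := by push_cast; ring
            rw [h22]
          · rw [if_neg hsp]
            have hna : ¬ ((k : Int) < PySem.Str.len s - 1 ∧
                PySem.Str.pyGet? s (((k + 1 : Nat) : Int)) = some ' ') := by
              intro ⟨_, h2⟩
              rw [hget] at h2
              exact hsp (Option.some_injective _ h2)
            rw [if_neg hna]
            simp
        · have hnil : s.toList.drop (k + 1) = [] := List.drop_eq_nil_of_le (by omega)
          rw [hcast, hnil]
          have hna : ¬ ((k : Int) < PySem.Str.len s - 1 ∧
              PySem.Str.pyGet? s (((k + 1 : Nat) : Int)) = some ' ') := by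
            intro ⟨h1, _⟩
            rw [hlens] at h1
            omega
          rw [if_neg hna]
          simp [PySem.List.enumerate, pvLoopB]
      · by_cases hdig : PySem.Chars.isdigit s.toList[k] = true
        · simp only [pvLoopA, pvLoopB, if_neg hdot, if_pos hdig]
          rw [hcast]
          exact ih (k + 1) (by omega) (by omega)
        · simp only [pvLoopA, pvLoopB, if_neg hdot, if_neg hdig]
          simp
-- one step of B's machine from the start state on a digit
theorem pvLoopB_start_digit (c : Char) (i : Int) (rest : List (Int × Char))
    (h1 : ¬ (c = '-' ∨ c = '*' ∨ c = '+')) (h2 : PySem.Chars.isdigit c = true) :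
    pvLoopB PvSt.start ((i, c) :: rest) = pvLoopB PvSt.digits rest := by
  simp only [pvLoopB, if_neg h1, if_pos h2]

-- startswith on a string whose char list starts with two known cells
theorem pv_sw2 (s : String) (a b c0 c1 : Char) (rest : List Char) (h : s.toList = c0 :: c1 :: rest)
    (p : String) (hpt : p.toList = [a, b]) :
    PySem.Str.startswith s p = true ↔ (c0 = a ∧ c1 = b) := by
  rw [PySem.Str.startswith_eq, PySem.Chars.startswith_iff, hpt, h]
  simp [List.cons_prefix_cons, eq_comm]

theorem pv_core (s : String) :
    (if PySem.Str.startswith s "- " then PySem.Str.strip (PySem.Str.slice s (some 2) none)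
      else if PySem.Str.startswith s "* " then PySem.Str.strip (PySem.Str.slice s (some 2) none)
      else if PySem.Str.startswith s "+ " then PySem.Str.strip (PySem.Str.slice s (some 2) none)
      else if 1 < PySem.Str.len s ∧ (PySem.Str.pyGet? s 0).any PySem.Chars.isdigit = true then
        match pvLoopA s (PySem.List.enumerate (PySem.Str.slice s (some 1) none).toList 1) with
        | some r => r
        | none => s
      else s)
    = (if pvLoopB PvSt.start (PySem.List.enumerate s.toList 0) ≠ 0
       then PySem.Str.strip (PySem.Str.slice s
          (some (pvLoopB PvSt.start (PySem.List.enumerate s.toList 0))) none)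
       else s) := by
  have hlens : PySem.Str.len s = (s.toList.length : Int) := by simp
  have hget0 : PySem.Str.pyGet? s 0 = s.toList[0]? := by
    simpa using PySem.Str.pyGet?_natCast s 0
  have henum : (PySem.Str.slice s (some 1) none).toList = s.toList.drop 1 := by
    rw [PySem.Str.toList_slice, PySem.Chars.slice_eq_listSlice,
      PySem.List.slice_from _ (by norm_num : (0:Int) ≤ 1)]
    norm_num
  cases hl : s.toList with
  | nil =>
    have h1 : ¬ PySem.Str.startswith s "- " = true := by
      rw [PySem.Str.startswith_eq, PySem.Chars.startswith_iff, hl]; simp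
    have h2 : ¬ PySem.Str.startswith s "* " = true := by
      rw [PySem.Str.startswith_eq, PySem.Chars.startswith_iff, hl]; simp
    have h3 : ¬ PySem.Str.startswith s "+ " = true := by
      rw [PySem.Str.startswith_eq, PySem.Chars.startswith_iff, hl]; simp
    rw [if_neg h1, if_neg h2, if_neg h3, if_neg (by rw [hlens, hl]; simp)]
    simp [PySem.List.enumerate, pvLoopB]
  | cons c0 t =>
    cases ht : t with
    | nil =>
      have hl1 : s.toList = [c0] := by rw [hl, ht]
      have hpre : ∀ a b : Char, ¬ ([a, b] <+: s.toList) := by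
        intro a b hp
        rw [hl1] at hp
        obtain ⟨u, hu⟩ := hp
        simp at hu
      have h1 : ¬ PySem.Str.startswith s "- " = true := by
        rw [PySem.Str.startswith_eq, PySem.Chars.startswith_iff]; exact hpre '-' ' '
      have h2 : ¬ PySem.Str.startswith s "* " = true := by
        rw [PySem.Str.startswith_eq, PySem.Chars.startswith_iff]; exact hpre '*' ' '
      have h3 : ¬ PySem.Str.startswith s "+ " = true := by
        rw [PySem.Str.startswith_eq, PySem.Chars.startswith_iff]; exact hpre '+' ' '
      have hBv : pvLoopB PvSt.start (PySem.List.enumerate [c0] 0) = 0 := by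
        rw [PySem.List.enumerate_cons]
        simp only [pvLoopB, PySem.List.enumerate_nil]
        split_ifs <;> rfl
      rw [if_neg h1, if_neg h2, if_neg h3, if_neg (by rw [hlens, hl1]; simp), hBv]
      simp
    | cons c1 rest =>
      have hl2 : s.toList = c0 :: c1 :: rest := by rw [hl, ht]
      have hsw1 := pv_sw2 s '-' ' ' c0 c1 rest hl2 "- " rfl
      have hsw2 := pv_sw2 s '*' ' ' c0 c1 rest hl2 "* " rfl
      have hsw3 := pv_sw2 s '+' ' ' c0 c1 rest hl2 "+ " rfl
      have hlen2 : 2 ≤ s.toList.length := by rw [hl2]; simp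
      have hdrop1 : s.toList.drop 1 = c1 :: rest := by rw [hl2]; rfl
      by_cases hb : c0 = '-' ∨ c0 = '*' ∨ c0 = '+'
      · have hnd : ¬ PySem.Chars.isdigit c0 = true := by
          rcases hb with h | h | h <;> rw [h] <;> simp [PySem.Chars.isdigit]
        have hBloop : pvLoopB PvSt.start (PySem.List.enumerate (c0 :: c1 :: rest) 0)
            = if c1 = ' ' then 2 else 0 := by
          rw [PySem.List.enumerate_cons, PySem.List.enumerate_cons]
          simp only [pvLoopB, if_pos hb]
          norm_num
        by_cases hsp : c1 = ' '
        · have hBv : pvLoopB PvSt.start (PySem.List.enumerate (c0 :: c1 :: rest) 0) = 2 := by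
            rw [hBloop, if_pos hsp]
          rw [hBv, if_pos (by norm_num : (2:Int) ≠ 0)]
          rcases hb with h | h | h
          · rw [if_pos (hsw1.mpr ⟨h, hsp⟩)]
          · by_cases h1 : PySem.Str.startswith s "- " = true
            · rw [if_pos h1]
            · rw [if_neg h1, if_pos (hsw2.mpr ⟨h, hsp⟩)]
          · by_cases h1 : PySem.Str.startswith s "- " = true
            · rw [if_pos h1]
            · rw [if_neg h1]
              by_cases h2 : PySem.Str.startswith s "* " = true
              · rw [if_pos h2]
              · rw [if_neg h2, if_pos (hsw3.mpr ⟨h, hsp⟩)]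
        · have h1 : ¬ PySem.Str.startswith s "- " = true := fun h => hsp (hsw1.mp h).2
          have h2 : ¬ PySem.Str.startswith s "* " = true := fun h => hsp (hsw2.mp h).2
          have h3 : ¬ PySem.Str.startswith s "+ " = true := fun h => hsp (hsw3.mp h).2
          have hg : ¬ (1 < PySem.Str.len s ∧ (PySem.Str.pyGet? s 0).any PySem.Chars.isdigit = true) := by
            intro ⟨_, hany⟩
            rw [hget0, hl2] at hany
            simp at hany
            exact hnd hany
          have hBv : pvLoopB PvSt.start (PySem.List.enumerate (c0 :: c1 :: rest) 0) = 0 := by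
            rw [hBloop, if_neg hsp]
          rw [if_neg h1, if_neg h2, if_neg h3, if_neg hg, hBv]
          simp
      · have hnb1 : c0 ≠ '-' := fun h => hb (Or.inl h)
        have hnb2 : c0 ≠ '*' := fun h => hb (Or.inr (Or.inl h))
        have hnb3 : c0 ≠ '+' := fun h => hb (Or.inr (Or.inr h))
        have h1 : ¬ PySem.Str.startswith s "- " = true := fun h => hnb1 (hsw1.mp h).1
        have h2 : ¬ PySem.Str.startswith s "* " = true := fun h => hnb2 (hsw2.mp h).1
        have h3 : ¬ PySem.Str.startswith s "+ " = true := fun h => hnb3 (hsw3.mp h).1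
        rw [if_neg h1, if_neg h2, if_neg h3]
        by_cases hdig : PySem.Chars.isdigit c0 = true
        · have hg : 1 < PySem.Str.len s ∧ (PySem.Str.pyGet? s 0).any PySem.Chars.isdigit = true := by
            refine ⟨by rw [hlens]; omega, ?_⟩
            rw [hget0, hl2]
            simpa using hdig
          rw [if_pos hg, henum]
          have hBv : pvLoopB PvSt.start (PySem.List.enumerate (c0 :: c1 :: rest) 0)
              = pvLoopB PvSt.digits (PySem.List.enumerate (s.toList.drop 1) ((1 : Nat) : Int)) := by
            rw [PySem.List.enumerate_cons, pvLoopB_start_digit c0 _ _ hb hdig, hdrop1]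
            norm_num
          have hA := pvAB s s.toList.length 1 (by omega) le_rfl
          have hone : ((1 : Nat) : Int) = (1 : Int) := by norm_num
          rw [hone] at hA hBv
          rw [hA, hBv]
          by_cases hz : pvLoopB PvSt.digits (PySem.List.enumerate (s.toList.drop 1) 1) = 0
          · simp only [hz]
            norm_num
          · rw [if_neg hz, if_pos hz]
        · have hg : ¬ (1 < PySem.Str.len s ∧ (PySem.Str.pyGet? s 0).any PySem.Chars.isdigit = true) := by
            intro ⟨_, hany⟩
            rw [hget0, hl2] at hany
            simp at hany
            exact hdig hany
          have hBv : pvLoopB PvSt.start (PySem.List.enumerate (c0 :: c1 :: rest) 0) = 0 := by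
            rw [PySem.List.enumerate_cons]
            simp only [pvLoopB, if_neg hb, if_neg hdig]
          rw [if_neg hg, hBv]
          simp

theorem pv_main (line : String) :
    extract_list_content_py line = extract_list_content_py_alt line :=
  pv_core (PySem.Str.strip line)

-- ===== VERDICT (by name: the statement is the Claim_ definition above) =====
theorem extract_list_content_py_spec : Claim_equal_extract_list_content_py := by
  intro line _
  unfold Spec_extract_list_content_py
  exact pv_main line
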